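-- pv_equiv track=rewrite | github.com/allenai/tracie | code/extractions/extractor_before_after.py | get_tmparg
-- ===== SOURCE A (Python) =====
-- def get_tmparg(tags):
--     ret = []
--     for i, tag in enumerate(tags):
--         if "B-ARGM-TMP" == tag:
--             cur_group = [i, -1]
--             for j in range(i + 1, len(tags)):
--                 if tags[j] != "I-ARGM-TMP":
--                     cur_group[1] = j
--                     break
--             ret.append(cur_group)
--     return ret
-- ===== SOURCE B (Python) =====
-- def get_tmparg(tags):
--     ret = []
--     start = -1
--     for j, tag in enumerate(tags):
--         if tag != "I-ARGM-TMP" and start != -1: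
--             ret.append([start, j])
--             start = -1
--         if tag == "B-ARGM-TMP":
--             start = j
--     if start != -1:
--         ret.append([start, -1])
--     return ret
-- ===== Notes on version B (the rewrite author's own statement) =====
-- stated objective: alternative
-- what changed: Replaced A's enumerate loop with a nested forward scan (resolving each group's end by lookahead when its B-tag is seen) by a single left-to-right pass that maintains one open-group start index and closes it when a non-I tag appears, emitting [start,-1] if still open at the end.
import Mathlib
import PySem

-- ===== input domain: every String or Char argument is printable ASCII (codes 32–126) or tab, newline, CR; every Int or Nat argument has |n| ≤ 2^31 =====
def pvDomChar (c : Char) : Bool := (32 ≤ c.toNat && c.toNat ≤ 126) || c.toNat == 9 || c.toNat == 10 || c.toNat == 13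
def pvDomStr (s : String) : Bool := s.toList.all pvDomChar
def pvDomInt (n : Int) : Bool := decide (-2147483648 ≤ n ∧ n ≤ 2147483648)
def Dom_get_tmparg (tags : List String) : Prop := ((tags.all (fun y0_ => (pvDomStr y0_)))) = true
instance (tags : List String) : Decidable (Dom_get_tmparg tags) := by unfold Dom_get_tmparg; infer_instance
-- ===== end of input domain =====

-- B replaces A's nested lookahead scan with a single pass maintaining one open-group start (alternative decomposition, same cost).


-- ===== PORT A =====
-- inner loop: for j in range(i+1, len(tags)): if tags[j] != "I-ARGM-TMP": cur_group[1] = j; break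
-- (structural recursion over the suffix tags[j:], carrying the absolute index j; -1 if the loop falls off)
def innerA : List String → Int → Int
  | [], _ => -1
  | t :: rs, j => if t ≠ "I-ARGM-TMP" then j else innerA rs (j + 1)

def loopA (tags : List String) : List (Int × String) → List (List Int) → List (List Int)
  | [], ret => ret
  | (i, tag) :: rest, ret =>
      loopA tags rest
        (if "B-ARGM-TMP" == tag then ret ++ [[i, innerA (tags.drop (i + 1).toNat) (i + 1)]] else ret)

def get_tmparg (tags : List String) : List (List Int) :=
  loopA tags (PySem.List.enumerate tags) []

-- ===== PORT B =====
-- one pass; state = (ret, start); start = -1 means no open group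
def loopB : List String → Int → Int → List (List Int) → List (List Int)
  | [], _, start, ret => if start ≠ -1 then ret ++ [[start, -1]] else ret
  | t :: rs, j, start, ret =>
      let p := if t ≠ "I-ARGM-TMP" ∧ start ≠ -1 then (ret ++ [[start, j]], (-1 : Int)) else (ret, start)
      loopB rs (j + 1) (if t == "B-ARGM-TMP" then j else p.2) p.1

def get_tmparg_alt (tags : List String) : List (List Int) :=
  loopB tags 0 (-1) []

-- ===== PRECONDITION & SPEC =====
def Spec_get_tmparg (tags : List String) (out : List (List Int)) : Prop := out = get_tmparg_alt tags
instance (tags : List String) (out : List (List Int)) : Decidable (Spec_get_tmparg tags out) := by unfold Spec_get_tmparg; infer_instance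

-- ===== CLAIM (what is proved, stated in full; the proofs are below) =====
def Claim_equal_get_tmparg : Prop := ∀ (tags : List String), Dom_get_tmparg tags → Spec_get_tmparg tags (get_tmparg tags)

-- ===== LEMMAS AND PROOFS =====

-- the pending open group of B, as A would have already resolved it by lookahead
def openPart (start : Int) (suffix : List String) (j : Int) : List (List Int) :=
  if start = -1 then [] else [[start, innerA suffix j]]

theorem loopA_loopB (tags : List String) :
    ∀ (suffix : List String) (j start : Int) (retb : List (List Int)),
      0 ≤ j → tags.drop j.toNat = suffix →
      loopA tags (PySem.List.enumerate suffix j) (retb ++ openPart start suffix j) =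
        loopB suffix j start retb := by
  intro suffix
  induction suffix with
  | nil =>
    intro j start retb hj _
    by_cases hs : start = -1 <;>
      simp [loopA, loopB, openPart, innerA, hs, PySem.List.enumerate]
  | cons t rs ih =>
    intro j start retb hj hdrop
    have hdrop' : tags.drop (j + 1).toNat = rs := by
      have h1 : (j + 1).toNat = j.toNat + 1 := by omega
      rw [h1, ← List.drop_drop, hdrop]
      simp
    have hj' : (0:Int) ≤ j + 1 := by omega
    rw [PySem.List.enumerate_cons]
    by_cases hB : "B-ARGM-TMP" == t
    · have hB' : t = "B-ARGM-TMP" := (beq_iff_eq.mp hB).symm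
      have htI : t ≠ "I-ARGM-TMP" := by simp [hB']
      by_cases hs : start = -1
      · -- no open group: A appends the new resolved group, B opens it
        have := ih (j + 1) j retb hj' hdrop'
        simpa [loopA, loopB, openPart, hB, hB', hs, htI, hdrop',
               show ¬ (j = -1) by omega] using this
      · -- open group closes at j (t ≠ I), new group opens at j
        have := ih (j + 1) j (retb ++ [[start, j]]) hj' hdrop'
        simpa [loopA, loopB, openPart, innerA, hB, hB', hs, htI, hdrop',
               show ¬ (j = -1) by omega] using this
    · have hB' : t ≠ "B-ARGM-TMP" := fun h => hB (by simp [h])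
      by_cases htI : t = "I-ARGM-TMP"
      · -- I tag: everything carried over unchanged; innerA skips it
        have := ih (j + 1) start retb hj' hdrop'
        simpa [loopA, loopB, openPart, innerA, hB, htI, hdrop'] using this
      · by_cases hs : start = -1
        · have := ih (j + 1) start retb hj' hdrop'
          simpa [loopA, loopB, openPart, hB, hB', htI, hs, hdrop'] using this
        · -- non-B non-I tag closes the open group at j
          have := ih (j + 1) (-1) (retb ++ [[start, j]]) hj' hdrop'
          simpa [loopA, loopB, openPart, innerA, hB, hB', htI, hs, hdrop'] using this

-- ===== VERDICT (by name: the statement is the Claim_ definition above) =====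
theorem get_tmparg_spec : Claim_equal_get_tmparg := by
  intro tags _
  unfold Spec_get_tmparg get_tmparg get_tmparg_alt
  have := loopA_loopB tags tags 0 (-1) [] (by omega) (by simp)
  simpa [openPart] using this
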